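-- pv_equiv track=rewrite | github.com/rathorology/Text-summarizer | bert_summarizer.py | get_segments
-- ===== SOURCE A (Python) =====
-- def get_segments(tokens, max_seq_length):
--     """Segments: 0 for the first sequence, 1 for the second"""
--     if len(tokens) > max_seq_length:
--         raise IndexError("Token length more than max seq length!")
--     segments = []
--     current_segment_id = 0
--     for token in tokens:
--         segments.append(current_segment_id)
--         if token == "[SEP]":
--             current_segment_id = 1
--     return segments + [0] * (max_seq_length - len(tokens))
-- ===== SOURCE B (Python) =====
-- def get_segments(tokens, max_seq_length):
--     """Segments: 0 for the first sequence, 1 for the second"""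
--     if len(tokens) > max_seq_length:
--         raise IndexError("Token length more than max seq length!")
--     if "[SEP]" in tokens:
--         i = tokens.index("[SEP]")
--         segments = [0] * (i + 1) + [1] * (len(tokens) - i - 1)
--     else:
--         segments = [0] * len(tokens)
--     return segments + [0] * (max_seq_length - len(tokens))
-- ===== Notes on version B (the rewrite author's own statement) =====
-- stated objective: alternative
-- what changed: Replaces the per-token flag-flipping loop by locating the first [SEP] once with tokens.index and building the 0-run and 1-run directly by list multiplication.
import Mathlib
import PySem

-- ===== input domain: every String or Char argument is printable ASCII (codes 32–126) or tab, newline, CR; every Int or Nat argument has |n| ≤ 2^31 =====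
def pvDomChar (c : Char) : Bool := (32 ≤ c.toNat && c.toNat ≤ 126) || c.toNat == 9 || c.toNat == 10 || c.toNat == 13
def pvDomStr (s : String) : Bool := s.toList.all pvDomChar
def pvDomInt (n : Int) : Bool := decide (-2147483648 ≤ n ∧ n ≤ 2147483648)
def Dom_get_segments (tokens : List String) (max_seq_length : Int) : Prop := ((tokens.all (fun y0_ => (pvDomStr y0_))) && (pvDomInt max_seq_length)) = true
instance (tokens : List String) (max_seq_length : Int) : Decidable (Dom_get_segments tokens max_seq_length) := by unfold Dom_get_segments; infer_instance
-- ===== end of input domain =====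

-- B locates the first [SEP] once and builds the runs by list multiplication instead of A's per-token flag-flipping loop (alternative decomposition).
-- ===== PORT A =====
def get_segments (tokens : List String) (max_seq_length : Int) : List Int :=
  -- segments = []; current_segment_id = 0; for token in tokens: append id; if token == "[SEP]": id = 1
  (tokens.foldl
    (fun (st : List Int × Int) token =>
      (st.1 ++ [st.2], if token == "[SEP]" then 1 else st.2))
    ([], 0)).1 ++ PySem.List.pyRepeat [(0 : Int)] (max_seq_length - tokens.length)

-- ===== PORT B =====
def get_segments_alt (tokens : List String) (max_seq_length : Int) : List Int :=
  (if "[SEP]" ∈ tokens then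
      List.replicate ((PySem.List.index? tokens "[SEP]").getD 0 + 1) (0 : Int) ++
        List.replicate (tokens.length - (PySem.List.index? tokens "[SEP]").getD 0 - 1) 1
    else
      List.replicate tokens.length (0 : Int))
    ++ PySem.List.pyRepeat [(0 : Int)] (max_seq_length - tokens.length)

-- ===== PRECONDITION & SPEC =====
-- A raises IndexError when len(tokens) > max_seq_length; exactly those inputs are excluded.
def Pre_get_segments (tokens : List String) (max_seq_length : Int) : Prop :=
  (tokens.length : Int) ≤ max_seq_length
instance (tokens : List String) (max_seq_length : Int) : Decidable (Pre_get_segments tokens max_seq_length) := by unfold Pre_get_segments; infer_instance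
def pvWitness_get_segments : List String × Int := (["a", "[SEP]", "b"], 5)

def Spec_get_segments (tokens : List String) (max_seq_length : Int) (out : List Int) : Prop := out = get_segments_alt tokens max_seq_length
instance (tokens : List String) (max_seq_length : Int) (out : List Int) : Decidable (Spec_get_segments tokens max_seq_length out) := by unfold Spec_get_segments; infer_instance

-- ===== CLAIM (what is proved, stated in full; the proofs are below) =====
def Claim_equal_get_segments : Prop := ∀ (tokens : List String) (max_seq_length : Int), Dom_get_segments tokens max_seq_length → Pre_get_segments tokens max_seq_length → Spec_get_segments tokens max_seq_length (get_segments tokens max_seq_length)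

-- ===== LEMMAS AND PROOFS =====

-- body of A's loop, as a structural recursion on the tokens with the current segment id
def segBody : List String → Int → List Int
  | [], _ => []
  | t :: ts, id => id :: segBody ts (if t == "[SEP]" then 1 else id)

theorem foldl_segBody (tokens : List String) (acc : List Int) (id : Int) :
    (tokens.foldl
      (fun (st : List Int × Int) token =>
        (st.1 ++ [st.2], if token == "[SEP]" then 1 else st.2))
      (acc, id)).1 = acc ++ segBody tokens id := by
  induction tokens generalizing acc id with
  | nil => simp [segBody]
  | cons t ts ih =>
    simp only [List.foldl_cons]
    rw [ih]
    simp [segBody]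

theorem segBody_one (tokens : List String) :
    segBody tokens 1 = List.replicate tokens.length 1 := by
  induction tokens with
  | nil => rfl
  | cons t ts ih =>
    rw [segBody, ite_self, ih, List.length_cons, List.replicate_succ]

theorem segBody_zero (tokens : List String) :
    segBody tokens 0 =
      (if "[SEP]" ∈ tokens then
        List.replicate ((PySem.List.index? tokens "[SEP]").getD 0 + 1) (0 : Int) ++
          List.replicate (tokens.length - (PySem.List.index? tokens "[SEP]").getD 0 - 1) 1
      else List.replicate tokens.length (0 : Int)) := by
  induction tokens with
  | nil => rfl
  | cons t ts ih =>
    by_cases ht : t = "[SEP]"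
    · subst ht
      rw [if_pos (List.mem_cons_self), PySem.List.index?_cons_self]
      simp [segBody, segBody_one]
    · by_cases hmem : "[SEP]" ∈ ts
      · obtain ⟨k, hk⟩ := Option.isSome_iff_exists.mp
          ((PySem.List.index?_isSome_iff ts "[SEP]").mpr hmem)
        have hidx : PySem.List.index? (t :: ts) "[SEP]" = some (k + 1) := by
          rw [PySem.List.index?_cons_of_ne ts ht, hk]; rfl
        have hmem' : "[SEP]" ∈ t :: ts := List.mem_cons_of_mem _ hmem
        rw [if_pos hmem', hidx]
        have hL : segBody (t :: ts) 0 = 0 :: segBody ts 0 := by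
          simp [segBody, ht]
        rw [hL, ih, if_pos hmem, hk]
        simp [List.replicate_succ, Nat.succ_sub_succ]
      · have hnot : "[SEP]" ∉ t :: ts := by
          simp [hmem, Ne.symm ht]
        rw [if_neg hnot]
        have hL : segBody (t :: ts) 0 = 0 :: segBody ts 0 := by
          simp [segBody, ht]
        rw [hL, ih, if_neg hmem]
        simp [List.replicate_succ]

-- ===== VERDICT (by name: the statement is the Claim_ definition above) =====
theorem get_segments_spec : Claim_equal_get_segments := by
  intro tokens max_seq_length _ _
  unfold Spec_get_segments get_segments get_segments_alt
  rw [foldl_segBody, List.nil_append, segBody_zero]
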